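-- pv_equiv track=rewrite | github.com/lancelote/advent_of_code | src/year2021/day3a.py | count_zeros_and_ones
-- ===== SOURCE A (Python) =====
-- from typing import Iterator
--
-- def count_zeros_and_ones(bits: Iterator[str]) -> tuple[int, int]:
--     zeros = 0
--     ones = 0
--
--     for bit in bits:
--         if bit == "0":
--             zeros += 1
--         else:
--             ones += 1
--
--     return zeros, ones
-- ===== SOURCE B (Python) =====
-- def count_zeros_and_ones(bits):
--     seq = list(bits)
--
--     def go(lo, hi):
--         # divide-and-conquer over the index range [lo, hi)
--         n = hi - lo
--         if n == 0:
--             return (0, 0)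
--         if n == 1:
--             return (1, 0) if seq[lo] == "0" else (0, 1)
--         mid = lo + n // 2
--         z1, o1 = go(lo, mid)
--         z2, o2 = go(mid, hi)
--         return (z1 + z2, o1 + o2)
--
--     return go(0, len(seq))
-- ===== Notes on version B (the rewrite author's own statement) =====
-- stated objective: alternative
-- what changed: Replaces the single branching loop with two accumulators by a divide-and-conquer recursion that splits the sequence in half and sums the (zeros, ones) pairs of the halves.
import Mathlib
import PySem

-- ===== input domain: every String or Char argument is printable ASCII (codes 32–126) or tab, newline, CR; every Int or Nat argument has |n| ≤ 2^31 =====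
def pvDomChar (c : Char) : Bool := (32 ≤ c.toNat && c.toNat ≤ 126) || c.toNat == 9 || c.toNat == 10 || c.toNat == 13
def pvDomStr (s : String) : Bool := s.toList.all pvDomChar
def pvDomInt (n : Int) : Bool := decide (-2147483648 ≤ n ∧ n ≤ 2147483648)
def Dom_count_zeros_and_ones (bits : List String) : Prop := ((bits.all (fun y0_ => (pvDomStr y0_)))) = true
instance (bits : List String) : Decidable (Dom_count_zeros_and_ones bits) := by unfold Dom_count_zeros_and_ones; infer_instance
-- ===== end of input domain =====

-- B replaces the branching loop by a divide-and-conquer recursion over halves (alternative decomposition); return values only.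

-- ===== PORT A =====
def count_zeros_and_ones (bits : List String) : Int × Int :=
  bits.foldl (fun (st : Int × Int) bit =>
    if bit == "0" then (st.1 + 1, st.2) else (st.1, st.2 + 1)) (0, 0)

-- ===== PORT B =====
-- go(lo, hi) of Source B, transcribed over the sublist it inspects: splitting [lo,hi) at
-- lo + n//2 corresponds to take/drop at n/2 of the current sublist.
def czoGo : List String → Int × Int
  | [] => (0, 0)
  | [b] => if b == "0" then (1, 0) else (0, 1)
  | a :: b :: rest =>
    let l := a :: b :: rest
    let mid := l.length / 2
    let p1 := czoGo (l.take mid)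
    let p2 := czoGo (l.drop mid)
    (p1.1 + p2.1, p1.2 + p2.2)
termination_by l => l.length
decreasing_by
  · simp [List.length_take]; omega
  · simp [List.length_drop]; omega

def count_zeros_and_ones_alt (bits : List String) : Int × Int :=
  czoGo bits

-- ===== PRECONDITION & SPEC =====
def Spec_count_zeros_and_ones (bits : List String) (out : Int × Int) : Prop := out = count_zeros_and_ones_alt bits
instance (bits : List String) (out : Int × Int) : Decidable (Spec_count_zeros_and_ones bits out) := by unfold Spec_count_zeros_and_ones; infer_instance

-- ===== CLAIM (what is proved, stated in full; the proofs are below) =====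
def Claim_equal_count_zeros_and_ones : Prop := ∀ (bits : List String), Dom_count_zeros_and_ones bits → Spec_count_zeros_and_ones bits (count_zeros_and_ones bits)

-- ===== LEMMAS AND PROOFS =====
-- Canonical value of the divide-and-conquer recursion: (#"0", #non-"0").
theorem czoGo_eq (l : List String) :
    czoGo l = ((PySem.List.count l "0" : Int),
               (l.length : Int) - (PySem.List.count l "0" : Int)) := by
  induction l using czoGo.induct with
  | case1 => simp [czoGo, PySem.List.count]
  | case2 b h => simp_all [czoGo, PySem.List.count]
  | case3 b h => simp_all [czoGo, PySem.List.count]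
  | case4 a b rest l mid ih2 ih1 =>
    rw [czoGo, ih1, ih2]
    have hcount : PySem.List.count ((a :: b :: rest).take ((a :: b :: rest).length / 2)) "0"
        + PySem.List.count ((a :: b :: rest).drop ((a :: b :: rest).length / 2)) "0"
        = PySem.List.count (a :: b :: rest) "0" := by
      simp only [PySem.List.count]
      rw [← List.count_append, List.take_append_drop]
    have hlen : ((a :: b :: rest).take ((a :: b :: rest).length / 2)).length
        + ((a :: b :: rest).drop ((a :: b :: rest).length / 2)).length
        = (a :: b :: rest).length := by
      simp only [List.length_take, List.length_drop]
      omega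
    refine Prod.ext ?_ ?_
    · show ((PySem.List.count ((a :: b :: rest).take ((a :: b :: rest).length / 2)) "0" : Int)
          + (PySem.List.count ((a :: b :: rest).drop ((a :: b :: rest).length / 2)) "0" : Int)) = _
      push_cast
      omega
    · show (((a :: b :: rest).take ((a :: b :: rest).length / 2)).length : Int)
          - (PySem.List.count ((a :: b :: rest).take ((a :: b :: rest).length / 2)) "0" : Int)
          + ((((a :: b :: rest).drop ((a :: b :: rest).length / 2)).length : Int)
          - (PySem.List.count ((a :: b :: rest).drop ((a :: b :: rest).length / 2)) "0" : Int)) = _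
      push_cast
      omega

theorem czo_foldl_shift (bits : List String) (z o : Int) :
    bits.foldl (fun (st : Int × Int) bit =>
      if bit == "0" then (st.1 + 1, st.2) else (st.1, st.2 + 1)) (z, o)
    = (z + (PySem.List.count bits "0" : Int),
       o + ((bits.length : Int) - (PySem.List.count bits "0" : Int))) := by
  induction bits generalizing z o with
  | nil => simp [PySem.List.count]
  | cons b bs ih =>
    simp only [List.foldl_cons]
    by_cases h : b = "0"
    · rw [if_pos (by simp [h]), ih]
      simp [PySem.List.count, h, Prod.ext_iff]
      omega
    · rw [if_neg (by simp [h]), ih]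
      simp [PySem.List.count, h, Prod.ext_iff]
      omega

-- ===== VERDICT (by name: the statement is the Claim_ definition above) =====
theorem count_zeros_and_ones_spec : Claim_equal_count_zeros_and_ones := by
  intro bits _
  unfold Spec_count_zeros_and_ones count_zeros_and_ones count_zeros_and_ones_alt
  rw [czo_foldl_shift, czoGo_eq]
  simp
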